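-- pv_equiv track=rewrite | github.com/zazazar/lc | 微软.py | solution
-- ===== SOURCE A (Python) =====
-- def solution(s):
--     n = len(s)
--     window = n if n % 2 == 0 else n-1
--     while window >= 2:
--         for i in range(n-window+1):
--             Target = True
--             alpha = set(s[i:i+window])
--             for j in alpha:
--                 if s[i:i+window].count(j) % 2 != 0:
--                     Target = False
--                     break
--             if Target:
--                 return window
--         window -= 2
--     return 0
-- ===== SOURCE B (Python) =====
-- def solution(s):
--     # Prefix parity-state hashing: the parity set of chars with odd count; a substring
--     # has all-even counts iff its endpoints share the same parity state. Record the
--     # first index of each state and maximize the span to an equal state.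
--     odd = set()
--     first = {frozenset(): 0}
--     best = 0
--     j = 0
--     for c in s:
--         j += 1
--         if c in odd:
--             odd.remove(c)
--         else:
--             odd.add(c)
--         key = frozenset(odd)
--         if key in first:
--             d = j - first[key]
--             if d > best:
--                 best = d
--         else:
--             first[key] = j
--     return best
-- ===== Notes on version B (the rewrite author's own statement) =====
-- stated objective: faster
-- what changed: Replaced A's shrinking-window scan that recounts every character of every substring (O(n^3)) by a single pass over prefix parity states (the set of characters with odd count so far), recording the first index of each state and maximizing the span between equal states.
import Mathlib
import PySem

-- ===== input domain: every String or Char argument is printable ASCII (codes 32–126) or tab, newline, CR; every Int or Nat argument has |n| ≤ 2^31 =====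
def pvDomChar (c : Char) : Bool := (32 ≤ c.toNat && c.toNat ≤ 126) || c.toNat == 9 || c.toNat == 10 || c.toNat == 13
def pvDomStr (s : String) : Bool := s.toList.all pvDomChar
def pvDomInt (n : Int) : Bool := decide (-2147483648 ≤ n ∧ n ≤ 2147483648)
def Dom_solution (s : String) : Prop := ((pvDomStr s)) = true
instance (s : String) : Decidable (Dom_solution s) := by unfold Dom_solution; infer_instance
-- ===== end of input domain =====

-- B replaces A's cubic shrinking-window scan by prefix parity-state hashing
-- (first index of each parity state, maximize the span between equal states).

-- ===== PORT A =====
-- inner 'for j in alpha: if count odd: Target=False; break' ≡ all distinct chars have even count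
def pvCheck (cs : List Char) (i w : Nat) : Bool :=
  let sub := PySem.List.slice cs (some (i : Int)) ((some ((i : Int) + (w : Int))))
  (PySem.Set.ofList sub).all (fun c => PySem.List.count sub c % 2 == 0)

-- 'while window >= 2: for i in range(n-window+1): … return window; window -= 2'
def pvLoopA (cs : List Char) (w : Nat) : Int :=
  if h : 2 ≤ w then
    if (List.range (cs.length - w + 1)).any (fun i => pvCheck cs i w) then (w : Int)
    else pvLoopA cs (w - 2)
  else 0
termination_by w
decreasing_by omega

def solution (s : String) : Int :=
  let cs := s.toList
  let n := cs.length
  pvLoopA cs (if n % 2 == 0 then n else n - 1)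

-- ===== PORT B =====
-- the running frozenset of odd-count chars, kept as a sorted duplicate-free list (canonical form)
def pvToggle (odd : List Char) (c : Char) : List Char :=
  if c ∈ odd then odd.erase c else List.orderedInsert (· ≤ ·) c odd

-- one loop iteration: state = (first-index dict, odd set, best, j)
def pvStepB (st : PySem.Dict (List Char) Nat × List Char × Nat × Nat) (c : Char) :
    PySem.Dict (List Char) Nat × List Char × Nat × Nat :=
  let first := st.1
  let odd := pvToggle st.2.1 c
  let j := st.2.2.2 + 1
  match first.get? odd with
  | some i => (first, odd, max st.2.2.1 (j - i), j)
  | none   => (first.insert odd j, odd, st.2.2.1, j)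

def solution_alt (s : String) : Int :=
  let r := s.toList.foldl pvStepB (PySem.Dict.empty.insert [] 0, ([] : List Char), 0, 0)
  Int.ofNat r.2.2.1

-- ===== PRECONDITION & SPEC =====
def Spec_solution (s : String) (out : Int) : Prop := out = solution_alt s
instance (s : String) (out : Int) : Decidable (Spec_solution s out) := by unfold Spec_solution; infer_instance

-- ===== CLAIM (what is proved, stated in full; the proofs are below) =====
def Claim_equal_solution : Prop := ∀ (s : String), Dom_solution s → Spec_solution s (solution s)

-- ===== LEMMAS AND PROOFS =====
theorem pvToggle_sorted_nodup (odd : List Char) (c : Char)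
    (hs : odd.Pairwise (· ≤ ·)) (hn : odd.Nodup) :
    (pvToggle odd c).Pairwise (· ≤ ·) ∧ (pvToggle odd c).Nodup := by
  unfold pvToggle
  split_ifs with h
  · exact ⟨hs.sublist (List.erase_sublist ..), hn.erase c⟩
  · refine ⟨List.Pairwise.orderedInsert c odd hs, ?_⟩
    rw [(List.perm_orderedInsert _ c odd).nodup_iff, List.nodup_cons]
    exact ⟨h, hn⟩

theorem mem_pvToggle (odd : List Char) (c x : Char) (hn : odd.Nodup) :
    (x ∈ pvToggle odd c) ↔ ((x ∈ odd ∧ x ≠ c) ∨ (x = c ∧ x ∉ odd)) := by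
  unfold pvToggle
  split_ifs with h
  · rw [hn.mem_erase_iff]
    constructor
    · rintro ⟨hne, hm⟩; exact Or.inl ⟨hm, hne⟩
    · rintro (⟨hm, hne⟩ | ⟨rfl, hnm⟩)
      · exact ⟨hne, hm⟩
      · exact absurd h hnm
  · rw [List.mem_orderedInsert]
    constructor
    · rintro (rfl | hm)
      · exact Or.inr ⟨rfl, h⟩
      · exact Or.inl ⟨hm, fun he => h (he ▸ hm)⟩
    · rintro (⟨hm, _⟩ | ⟨rfl, _⟩)
      · exact Or.inr hm
      · exact Or.inl rfl

theorem length_pvToggle_parity (odd : List Char) (c : Char) :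
    (pvToggle odd c).length % 2 = (odd.length + 1) % 2 := by
  unfold pvToggle
  split_ifs with h
  · rw [List.length_erase_of_mem h]
    have : 1 ≤ odd.length := List.length_pos_of_mem h
    omega
  · rw [List.orderedInsert_length]
theorem pvFold_sorted_nodup (l : List Char) :
    (l.foldl pvToggle []).Pairwise (· ≤ ·) ∧ (l.foldl pvToggle []).Nodup := by
  induction l using List.reverseRecOn with
  | nil => simp
  | append_singleton l c ih =>
    rw [List.foldl_append, List.foldl_cons, List.foldl_nil]
    exact pvToggle_sorted_nodup _ c ih.1 ih.2

theorem mem_pvFold (l : List Char) (x : Char) :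
    (x ∈ l.foldl pvToggle []) ↔ l.count x % 2 = 1 := by
  induction l using List.reverseRecOn with
  | nil => simp
  | append_singleton l c ih =>
    rw [List.foldl_append, List.foldl_cons, List.foldl_nil,
      mem_pvToggle _ _ _ (pvFold_sorted_nodup l).2, ih,
      List.count_append]
    rcases eq_or_ne x c with rfl | hx
    · simp
      omega
    · simp [hx, hx.symm]

theorem length_pvFold_parity (l : List Char) :
    (l.foldl pvToggle []).length % 2 = l.length % 2 := by
  induction l using List.reverseRecOn with
  | nil => simp
  | append_singleton l c ih =>
    rw [List.foldl_append, List.foldl_cons, List.foldl_nil, length_pvToggle_parity,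
      List.length_append, List.length_singleton]
    omega

theorem pv_eq_of_mem_iff (l₁ l₂ : List Char)
    (hs₁ : l₁.Pairwise (· ≤ ·)) (hs₂ : l₂.Pairwise (· ≤ ·))
    (hn₁ : l₁.Nodup) (hn₂ : l₂.Nodup)
    (h : ∀ x, x ∈ l₁ ↔ x ∈ l₂) : l₁ = l₂ := by
  have hp : l₁.Perm l₂ := by
    rw [List.perm_iff_count]
    intro a
    by_cases ha : a ∈ l₁
    · rw [List.count_eq_one_of_mem hn₁ ha, List.count_eq_one_of_mem hn₂ ((h a).1 ha)]
    · rw [List.count_eq_zero.2 ha, List.count_eq_zero.2 (fun hm => ha ((h a).2 hm))]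
  exact hp.eq_of_pairwise (fun a b _ _ h1 h2 => le_antisymm h1 h2) hs₁ hs₂
def pvO (cs : List Char) (k : Nat) : List Char := (cs.take k).foldl pvToggle []

def pvF (cs : List Char) (k : Nat) : Nat :=
  Nat.find (p := fun i => pvO cs i = pvO cs k) ⟨k, rfl⟩

def pvN (cs : List Char) : Nat :=
  (Finset.range (cs.length + 1)).sup (fun k => k - pvF cs k)

theorem mem_pvO (cs : List Char) (k : Nat) (x : Char) :
    x ∈ pvO cs k ↔ (cs.take k).count x % 2 = 1 := mem_pvFold _ x

theorem pvO_parity (cs : List Char) (i j : Nat) (hi : i ≤ cs.length) (hj : j ≤ cs.length)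
    (h : pvO cs i = pvO cs j) : i % 2 = j % 2 := by
  have h1 := length_pvFold_parity (cs.take i)
  have h2 := length_pvFold_parity (cs.take j)
  rw [List.length_take] at h1 h2
  unfold pvO at h
  rw [h] at h1
  omega

theorem pvCheck_iff (cs : List Char) (i w : Nat) :
    pvCheck cs i w = true ↔ pvO cs (i + w) = pvO cs i := by
  unfold pvCheck
  rw [PySem.List.slice_natCast_add]
  set sub := (cs.drop i).take w with hsub
  have hcnt : ∀ x : Char, (cs.take (i + w)).count x = (cs.take i).count x + sub.count x :=
    fun x => by rw [List.take_add, List.count_append]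
  have hall : ((PySem.Set.ofList sub).all fun c => PySem.List.count sub c % 2 == 0) = true ↔
      ∀ x : Char, sub.count x % 2 = 0 := by
    rw [List.all_eq_true]
    constructor
    · intro hall x
      by_cases hx : x ∈ sub
      · have := hall x ((PySem.Set.mem_ofList _ _).2 hx)
        simpa [PySem.List.count_eq] using this
      · simp [List.count_eq_zero.2 hx]
    · intro hx c _
      simpa [PySem.List.count_eq] using hx c
  rw [hall]
  have hmem : ∀ x : Char, (sub.count x % 2 = 0 ↔ (x ∈ pvO cs (i + w) ↔ x ∈ pvO cs i)) := by
    intro x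
    rw [mem_pvO, mem_pvO, hcnt x]
    omega
  constructor
  · intro hx
    exact pv_eq_of_mem_iff _ _ (pvFold_sorted_nodup _).1 (pvFold_sorted_nodup _).1
      (pvFold_sorted_nodup _).2 (pvFold_sorted_nodup _).2 (fun x => (hmem x).1 (hx x))
  · intro heq x
    exact (hmem x).2 (by rw [heq])
theorem pvF_le (cs : List Char) (k : Nat) : pvF cs k ≤ k := Nat.find_le rfl

theorem pvO_pvF (cs : List Char) (k : Nat) : pvO cs (pvF cs k) = pvO cs k :=
  Nat.find_spec (p := fun i => pvO cs i = pvO cs k) ⟨k, rfl⟩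

theorem pvF_congr (cs : List Char) (a b : Nat) (h : pvO cs a = pvO cs b) :
    pvF cs a = pvF cs b := by
  apply le_antisymm
  · exact Nat.find_le (h ▸ pvO_pvF cs b)
  · exact Nat.find_le (h ▸ pvO_pvF cs a)

theorem pv_le_pvN (cs : List Char) (k : Nat) (hk : k ≤ cs.length) :
    k - pvF cs k ≤ pvN cs :=
  Finset.le_sup (f := fun k => k - pvF cs k) (Finset.mem_range.2 (by omega))

theorem pvN_exists (cs : List Char) : ∃ k ≤ cs.length, k - pvF cs k = pvN cs := by
  obtain ⟨k, hk, hsup⟩ := Finset.exists_mem_eq_sup (Finset.range (cs.length + 1))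
    ⟨0, Finset.mem_range.2 (by omega)⟩ (fun k => k - pvF cs k)
  rw [Finset.mem_range] at hk
  exact ⟨k, by omega, hsup.symm⟩
theorem pvN_even (cs : List Char) : pvN cs % 2 = 0 := by
  obtain ⟨k, hk, he⟩ := pvN_exists cs
  have h1 := pvF_le cs k
  have h2 := pvO_parity cs (pvF cs k) k (by omega) hk (pvO_pvF cs k)
  omega

theorem pvAny_iff (cs : List Char) (w : Nat) (hw : w ≤ cs.length) :
    ((List.range (cs.length - w + 1)).any (fun i => pvCheck cs i w) = true) ↔
      ∃ i, i + w ≤ cs.length ∧ pvO cs (i + w) = pvO cs i := by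
  rw [List.any_eq_true]
  constructor
  · rintro ⟨i, hi, hc⟩
    rw [List.mem_range] at hi
    have hiw : i + w ≤ cs.length := by omega
    exact ⟨i, hiw, (pvCheck_iff cs i w).1 hc⟩
  · rintro ⟨i, hiw, he⟩
    exact ⟨i, List.mem_range.2 (by omega), (pvCheck_iff cs i w).2 he⟩

theorem pvLoopA_eq (cs : List Char) (w : Nat) (hw : w % 2 = 0) (hwn : w ≤ cs.length)
    (hN : pvN cs ≤ w) : pvLoopA cs w = (pvN cs : Int) := by
  induction w using Nat.strong_induction_on with
  | _ w ih =>
    rw [pvLoopA]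
    split_ifs with h2 hany
    · -- some window of width w found: w must be exactly pvN
      rw [pvAny_iff cs w hwn] at hany
      obtain ⟨i, hiw, he⟩ := hany
      have hle : w ≤ (i + w) - pvF cs (i + w) := by
        have : pvF cs (i + w) ≤ i := Nat.find_le he.symm
        omega
      have := pv_le_pvN cs (i + w) hiw
      congr 1
      omega
    · -- no window of width w: pvN < w, recurse
      have hlt : pvN cs < w := by
        rcases Nat.lt_or_ge (pvN cs) w with h | h
        · exact h
        · exfalso
          have : pvN cs = w := by omega
          obtain ⟨k, hk, he⟩ := pvN_exists cs
          apply hany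
          rw [pvAny_iff cs w hwn]
          refine ⟨pvF cs k, ?_, ?_⟩
          · have := pvF_le cs k; omega
          · have h1 := pvF_le cs k
            have : pvF cs k + w = k := by omega
            rw [this]
            exact (pvO_pvF cs k).symm
      have hNe := pvN_even cs
      exact ih (w - 2) (by omega) (by omega) (by omega) (by omega)
    · -- w < 2 and pvN ≤ w even: pvN = 0
      have := pvN_even cs
      omega
theorem pvO_succ (cs : List Char) (j : Nat) (hj : j < cs.length) :
    pvO cs (j + 1) = pvToggle (pvO cs j) cs[j] := by
  unfold pvO
  rw [List.take_add_one, List.getElem?_eq_getElem hj, Option.toList_some, List.foldl_append,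
    List.foldl_cons, List.foldl_nil]

theorem pvF_self_of_new (cs : List Char) (j : Nat)
    (h : ∀ k, k ≤ j → pvO cs k ≠ pvO cs (j + 1)) : pvF cs (j + 1) = j + 1 := by
  have h1 := pvF_le cs (j + 1)
  rcases Nat.lt_or_ge (pvF cs (j + 1)) (j + 1) with hlt | hge
  · exact absurd (pvO_pvF cs (j + 1)) (h _ (by omega))
  · omega

theorem pvStepB_inv (cs : List Char) (j : Nat) (hj : j ≤ cs.length) :
    ∃ d : PySem.Dict (List Char) Nat,
      (cs.take j).foldl pvStepB (PySem.Dict.empty.insert [] 0, ([] : List Char), 0, 0) =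
        (d, pvO cs j, (Finset.range (j + 1)).sup (fun k => k - pvF cs k), j) ∧
      (∀ k, k ≤ j → d.get? (pvO cs k) = some (pvF cs k)) ∧
      (∀ st, (∀ k, k ≤ j → pvO cs k ≠ st) → d.get? st = none) := by
  induction j with
  | zero =>
    refine ⟨PySem.Dict.empty.insert [] 0, ?_, ?_, ?_⟩
    · have hsup : (Finset.range 1).sup (fun k => k - pvF cs k) = 0 := by
        rw [Finset.range_one, Finset.sup_singleton]
        omega
      rw [hsup]
      rfl
    · intro k hk
      interval_cases k
      have : pvF cs 0 = 0 := Nat.le_zero.1 (pvF_le cs 0)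
      rw [this]
      have h0 : pvO cs 0 = [] := rfl
      rw [h0, PySem.Dict.get?_insert_self]
    · intro st hst
      have hne : st ≠ [] := fun h => (hst 0 (by omega) (h ▸ rfl)).elim
      rw [PySem.Dict.get?_insert_of_ne _ _ hne, PySem.Dict.get?_empty]
  | succ j ih =>
    obtain ⟨d, heq, inv2, inv3⟩ := ih (by omega)
    have hjl : j < cs.length := by omega
    have hstep : (cs.take (j + 1)).foldl pvStepB (PySem.Dict.empty.insert [] 0, ([] : List Char), 0, 0) =
        pvStepB (d, pvO cs j, (Finset.range (j + 1)).sup (fun k => k - pvF cs k), j) cs[j] := by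
      rw [List.take_add_one, List.getElem?_eq_getElem hjl, Option.toList_some, List.foldl_append,
        heq, List.foldl_cons, List.foldl_nil]
    have hsup : (Finset.range (j + 2)).sup (fun k => k - pvF cs k) =
        max ((Finset.range (j + 1)).sup (fun k => k - pvF cs k)) ((j + 1) - pvF cs (j + 1)) := by
      rw [Finset.range_add_one, Finset.sup_insert]
      exact Nat.max_comm _ _
    by_cases hseen : ∃ k, k ≤ j ∧ pvO cs k = pvO cs (j + 1)
    · obtain ⟨k, hk, hkeq⟩ := hseen
      have hget : d.get? (pvO cs (j + 1)) = some (pvF cs (j + 1)) := by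
        rw [← hkeq, inv2 k hk, pvF_congr cs k (j + 1) hkeq]
      refine ⟨d, ?_, ?_, ?_⟩
      · rw [hstep]
        simp only [pvStepB, ← pvO_succ cs j hjl, hget, hsup]
      · intro k' hk'
        rcases Nat.lt_or_ge k' (j + 1) with h | h
        · exact inv2 k' (by omega)
        · have : k' = j + 1 := by omega
          rw [this]; exact hget
      · intro st hst
        exact inv3 st (fun k hk => hst k (by omega))
    · push Not at hseen
      have hget : d.get? (pvO cs (j + 1)) = none :=
        inv3 _ (fun k hk => hseen k hk)
      have hF : pvF cs (j + 1) = j + 1 := pvF_self_of_new cs j (fun k hk => hseen k hk)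
      refine ⟨d.insert (pvO cs (j + 1)) (j + 1), ?_, ?_, ?_⟩
      · rw [hstep]
        simp only [pvStepB, ← pvO_succ cs j hjl, hget, hsup, hF]
        simp
      · intro k' hk'
        rcases Nat.lt_or_ge k' (j + 1) with h | h
        · rw [PySem.Dict.get?_insert_of_ne _ _ (hseen k' (by omega))]
          exact inv2 k' (by omega)
        · have : k' = j + 1 := by omega
          rw [this, PySem.Dict.get?_insert_self, hF]
      · intro st hst
        rw [PySem.Dict.get?_insert_of_ne _ _ (fun h => (hst (j + 1) (by omega) h.symm).elim)]
        exact inv3 st (fun k hk => hst k (by omega))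
theorem solution_alt_eq (s : String) : solution_alt s = (pvN s.toList : Int) := by
  obtain ⟨d, heq, -, -⟩ := pvStepB_inv s.toList s.toList.length (le_refl _)
  rw [List.take_length] at heq
  unfold solution_alt
  rw [heq]
  rfl

theorem solution_eq (s : String) : solution s = (pvN s.toList : Int) := by
  show pvLoopA s.toList (if (s.toList.length % 2 == 0) = true then s.toList.length else s.toList.length - 1) = (pvN s.toList : Int)
  have hN : pvN s.toList ≤ s.toList.length := by
    obtain ⟨k, hk, he⟩ := pvN_exists s.toList
    have := pvF_le s.toList k
    omega
  have hNe := pvN_even s.toList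
  by_cases h : s.toList.length % 2 = 0
  · rw [if_pos (beq_iff_eq.mpr h)]
    exact pvLoopA_eq s.toList s.toList.length h (le_refl _) hN
  · rw [if_neg (fun hc => h (beq_iff_eq.mp hc))]
    exact pvLoopA_eq s.toList (s.toList.length - 1) (by omega) (by omega) (by omega)

-- ===== VERDICT (by name: the statement is the Claim_ definition above) =====
theorem solution_spec : Claim_equal_solution := by
  intro s _
  unfold Spec_solution
  rw [solution_eq, solution_alt_eq]
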